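-- pv_equiv track=rewrite | github.com/saimerit/CODEFORCE-Solutions | 2059B.py | min_cost_of_array
-- ===== SOURCE A (Python) =====
-- def min_cost_of_array(n, k, a):
--     # Forming k subarrays from a
--     subarrays = [[] for _ in range(k)]
--     for i in range(n):
--         subarrays[i % k].append(a[i])
--
--     # Constructing b using even indexed subarrays (1-based)
--     b = []
--     for i in range(1, k, 2):  # 1-based even indices are 1, 3, 5,... (0-based: 0, 2, 4,...)
--         b.extend(subarrays[i])
--
--     b.append(0)  # Append 0 to the end
--
--     # Find the first nonzero element's index (1-based)
--     for i, val in enumerate(b):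
--         if val != 0:
--             return i + 1  # Convert to 1-based index
--
--     return len(b)  # If all elements are zero (unlikely based on constraints)
-- ===== SOURCE B (Python) =====
-- def min_cost_of_array(n, k, a):
--     # Walk the odd buckets' indices directly (bucket-major order: j, j+k, j+2k, ...)
--     # with a 1-based running position; no bucket lists and no concatenated list b.
--     pos = 1
--     for j in range(1, k, 2):
--         for i in range(j, n, k):
--             if a[i] != 0:
--                 return pos
--             pos += 1
--     return pos
-- ===== Notes on version B (the rewrite author's own statement) =====
-- stated objective: simpler
-- what changed: B drops the k bucket lists and the concatenated list b entirely: it walks the odd buckets' indices j, j+k, j+2k, ... directly in the same bucket-major order with a running 1-based position counter, returning the counter at the first nonzero element (or the final counter if all are zero); avoiding all list building also makes it measurably faster by a constant factor.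
import Mathlib
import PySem

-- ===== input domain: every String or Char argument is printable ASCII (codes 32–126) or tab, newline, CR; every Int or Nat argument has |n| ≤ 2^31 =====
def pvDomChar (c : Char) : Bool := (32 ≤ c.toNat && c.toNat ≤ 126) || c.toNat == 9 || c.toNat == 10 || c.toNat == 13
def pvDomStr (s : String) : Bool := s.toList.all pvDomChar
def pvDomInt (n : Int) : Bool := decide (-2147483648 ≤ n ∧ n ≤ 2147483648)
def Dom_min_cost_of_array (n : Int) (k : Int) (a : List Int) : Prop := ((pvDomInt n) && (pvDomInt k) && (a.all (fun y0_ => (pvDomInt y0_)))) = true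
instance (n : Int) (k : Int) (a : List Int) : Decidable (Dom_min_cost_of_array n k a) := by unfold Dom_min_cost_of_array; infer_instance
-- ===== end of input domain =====

-- B walks the odd buckets' indices directly (bucket-major) with a running 1-based
-- position counter instead of building the k bucket lists and the concatenated list b (objective: simpler).


-- ===== PORT A =====
-- subarrays[t].append(x): exact for the in-range nonnegative t = i % k that A uses under Pre_
def appendAt (S : List (List Int)) (t : Int) (x : Int) : List (List Int) :=
  match S with
  | [] => []
  | l :: ls => if t = 0 then (l ++ [x]) :: ls else l :: appendAt ls (t - 1) x

-- A's final enumerate loop: some (i+1) for the first index i with b[i] ≠ 0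
def findNZ (l : List Int) (i : Int) : Option Int :=
  match l with
  | [] => none
  | v :: t => if v ≠ 0 then some (i + 1) else findNZ t (i + 1)

def min_cost_of_array (n : Int) (k : Int) (a : List Int) : Int :=
  let subarrays := (PySem.List.pyRange 0 n 1).foldl
      (fun S i => appendAt S (PySem.Int.mod i k) (PySem.List.pyGetD a i 0))
      (List.replicate k.toNat [])
  let b := (PySem.List.pyRange 1 k 2).foldl
      (fun acc j => acc ++ PySem.List.pyGetD subarrays j []) []
  let b2 := b ++ [0]
  match findNZ b2 0 with
  | some r => r
  | none => (b2.length : Int)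

-- ===== PORT B =====
-- inner loop: for i in range(j, n, k): return pos at the first nonzero, else carry pos on
def bInner (a : List Int) (idxs : List Int) (pos : Int) : Int ⊕ Int :=
  match idxs with
  | [] => .inr pos
  | i :: t => if PySem.List.pyGetD a i 0 ≠ 0 then .inl pos else bInner a t (pos + 1)

-- outer loop: for j in range(1, k, 2)
def bOuter (a : List Int) (n : Int) (k : Int) (js : List Int) (pos : Int) : Int :=
  match js with
  | [] => pos
  | j :: t =>
    match bInner a (PySem.List.pyRange j n k) pos with
    | .inl ans => ans
    | .inr pos' => bOuter a n k t pos'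

def min_cost_of_array_alt (n : Int) (k : Int) (a : List Int) : Int :=
  bOuter a n k (PySem.List.pyRange 1 k 2) 1

-- ===== PRECONDITION & SPEC =====
-- Pre_ excludes exactly the inputs where Python A raises: with 0 < n, a k ≤ 0 gives
-- ZeroDivisionError/IndexError at subarrays[i % k], and n > len(a) gives IndexError at a[i].
def Pre_min_cost_of_array (n : Int) (k : Int) (a : List Int) : Prop :=
  (0 < n → 1 ≤ k) ∧ n ≤ (a.length : Int)
instance (n : Int) (k : Int) (a : List Int) : Decidable (Pre_min_cost_of_array n k a) := by
  unfold Pre_min_cost_of_array; infer_instance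

def pvWitness_min_cost_of_array : Int × Int × List Int := (4, 3, [0, 5, 0, 2])

def Spec_min_cost_of_array (n : Int) (k : Int) (a : List Int) (out : Int) : Prop := out = min_cost_of_array_alt n k a
instance (n : Int) (k : Int) (a : List Int) (out : Int) : Decidable (Spec_min_cost_of_array n k a out) := by unfold Spec_min_cost_of_array; infer_instance

-- ===== CLAIM (what is proved, stated in full; the proofs are below) =====
def Claim_equal_min_cost_of_array : Prop := ∀ (n : Int) (k : Int) (a : List Int), Dom_min_cost_of_array n k a → Pre_min_cost_of_array n k a → Spec_min_cost_of_array n k a (min_cost_of_array n k a)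

-- ===== LEMMAS AND PROOFS =====

-- common reference loop: position of the first nonzero of l, counting from pos; pos+len l if none
def g (l : List Int) (pos : Int) : Int :=
  match l with
  | [] => pos
  | v :: t => if v ≠ 0 then pos else g t (pos + 1)

theorem findNZ_append_zero (l : List Int) (i : Int) : findNZ (l ++ [(0 : Int)]) i = findNZ l i := by
  induction l generalizing i with
  | nil => simp [findNZ]
  | cons v t ih => by_cases h : v = 0 <;> simp [findNZ, h, ih]

theorem findNZ_g (l : List Int) (c : Int) :
    (match findNZ l c with | some r => r | none => c + (l.length : Int) + 1) = g l (c + 1) := by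
  induction l generalizing c with
  | nil => simp [findNZ, g]
  | cons v t ih =>
    by_cases h : v = 0
    · simpa [findNZ, g, h, add_comm, add_assoc, add_left_comm] using ih (c + 1)
    · simp [findNZ, g, h]

theorem bInner_g (a : List Int) (idxs : List Int) (pos : Int) (rest : List Int) :
    (match bInner a idxs pos with | .inl x => x | .inr p => g rest p)
      = g (idxs.map (fun i => PySem.List.pyGetD a i 0) ++ rest) pos := by
  induction idxs generalizing pos with
  | nil => simp [bInner]
  | cons i t ih =>
    by_cases h : PySem.List.pyGetD a i 0 = 0
    · simpa [bInner, g, h] using ih (pos + 1)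
    · simp [bInner, g, h]

theorem bOuter_g (a : List Int) (n k : Int) (js : List Int) (pos : Int) :
    bOuter a n k js pos
      = g (js.flatMap (fun j => (PySem.List.pyRange j n k).map (fun i => PySem.List.pyGetD a i 0))) pos := by
  induction js generalizing pos with
  | nil => simp [bOuter, g]
  | cons j t ih =>
    rw [List.flatMap_cons, ← bInner_g a _ pos]
    cases hbi : bInner a (PySem.List.pyRange j n k) pos with
    | inl x => simp [bOuter, hbi]
    | inr p => simp [bOuter, hbi, ih]

theorem appendAt_length (S : List (List Int)) (t x : Int) : (appendAt S t x).length = S.length := by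
  induction S generalizing t with
  | nil => rfl
  | cons l ls ih => by_cases h : t = 0 <;> simp [appendAt, h, ih]

theorem foldl_appendAt_length (idxs : List Int) (S : List (List Int)) (F : Int → Int) (G : Int → Int) :
    (idxs.foldl (fun S i => appendAt S (F i) (G i)) S).length = S.length := by
  induction idxs generalizing S with
  | nil => rfl
  | cons i t ih => simp [List.foldl_cons, ih, appendAt_length]

theorem appendAt_getD (x : Int) : ∀ (S : List (List Int)) (t : Int) (m : Nat), m < S.length →
    (appendAt S t x).getD m [] = if (m : Int) = t then S.getD m [] ++ [x] else S.getD m [] := by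
  intro S
  induction S with
  | nil => intro t m h; simp at h
  | cons l ls ih =>
    intro t m h
    by_cases ht : t = 0
    · subst ht
      cases m with
      | zero => simp [appendAt]
      | succ m' =>
        have hne : ((m' : Int) + 1) ≠ 0 := by omega
        simp [appendAt, List.getD, hne]
    · cases m with
      | zero =>
        have hne : ¬ ((0 : Int) = t) := fun hh => ht hh.symm
        simp [appendAt, ht, hne]
      | succ m' =>
        have hrec := ih (t - 1) m' (by simpa using h)
        by_cases hq : (m' : Int) = t - 1
        · have hq' : (m' : Int) + 1 = t := by omega
          simp [appendAt, ht, List.getD] at hrec ⊢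
          simp [hrec, hq]
        · have hq' : ¬ ((m' : Int) + 1 = t) := by omega
          simp [appendAt, ht, List.getD] at hrec ⊢
          simp [hrec, hq, if_neg hq']

theorem appendAt_pyGetD (S : List (List Int)) (t x : Int) (j : Int) (hj0 : 0 ≤ j)
    (hjlen : j < (S.length : Int)) :
    PySem.List.pyGetD (appendAt S t x) j []
      = if j = t then PySem.List.pyGetD S j [] ++ [x] else PySem.List.pyGetD S j [] := by
  rw [PySem.List.pyGetD_of_nonneg _ _ hj0, PySem.List.pyGetD_of_nonneg _ _ hj0]
  have hcast : ((j.toNat : Nat) : Int) = j := Int.toNat_of_nonneg hj0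
  have := appendAt_getD x S t j.toNat (by omega)
  rw [hcast] at this
  exact this

-- range(j, b, s) with positive step s is empty when b ≤ j
theorem pyRange_pos_eq_nil {j b s : Int} (hs : 0 < s) (h : b ≤ j) : PySem.List.pyRange j b s = [] := by
  rw [PySem.List.pyRange_of_pos _ _ hs, if_neg (by omega)]
  simp

-- growing the stop of a positive-step range by one appends b exactly when s ∣ b - j
theorem pyRange_pos_succ_right {j b s : Int} (hs : 0 < s) (hj : j ≤ b) :
    PySem.List.pyRange j (b + 1) s
      = PySem.List.pyRange j b s ++ (if s ∣ (b - j) then [b] else []) := by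
  rw [PySem.List.pyRange_of_pos _ _ hs, PySem.List.pyRange_of_pos _ _ hs]
  have hlt : j < b + 1 := by omega
  rw [if_pos hlt]
  set d := b - j with hd
  have hd0 : 0 ≤ d := by omega
  set q := d / s with hqdef
  set r := d % s with hrdef
  have hqr : s * q + r = d := Int.mul_ediv_add_emod d s
  have hr0 : 0 ≤ r := Int.emod_nonneg d (ne_of_gt hs)
  have hrs : r < s := Int.emod_lt_of_pos d hs
  have hq0 : 0 ≤ q := Int.ediv_nonneg hd0 (le_of_lt hs)
  have hexp : (q + 1) * s = s * q + s := by ring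
  have hexp2 : q * s = s * q := by ring
  have hc2 : (b + 1 - j + s - 1) / s = q + 1 := by
    have h1 : b + 1 - j + s - 1 = r + (q + 1) * s := by omega
    rw [h1, Int.add_mul_ediv_right _ _ (ne_of_gt hs), Int.ediv_eq_zero_of_lt hr0 hrs, zero_add]
  by_cases hdvd : s ∣ d
  · have hr : r = 0 := Int.emod_eq_zero_of_dvd hdvd
    rw [if_pos hdvd]
    have hc1 : (if j < b then ((b - j + s - 1) / s).toNat else 0) = q.toNat := by
      by_cases hjb : j < b
      · have h1 : b - j + s - 1 = (s - 1) + q * s := by omega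
        rw [if_pos hjb, h1, Int.add_mul_ediv_right _ _ (ne_of_gt hs),
          Int.ediv_eq_zero_of_lt (by omega : (0:Int) ≤ s - 1) (by omega : s - 1 < s), zero_add]
      · have hq' : q = 0 := by
          have : d = 0 := by omega
          simp [hqdef, this]
        rw [if_neg hjb, hq']
        rfl
    have hc2' : ((b + 1 - j + s - 1) / s).toNat = q.toNat + 1 := by rw [hc2]; omega
    rw [hc1, hc2', List.range_succ, List.map_append]
    simp only [List.map_cons, List.map_nil]
    congr 2
    have : s * q = d := by omega
    rw [Int.toNat_of_nonneg hq0]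
    omega
  · have hrpos : 0 < r := by
      rcases lt_or_eq_of_le hr0 with h | h
      · exact h
      · exfalso; exact hdvd (Int.dvd_of_emod_eq_zero h.symm)
    rw [if_neg hdvd]
    have hsq : 0 ≤ s * q := mul_nonneg (le_of_lt hs) hq0
    have hjb : j < b := by omega
    have hc1 : (b - j + s - 1) / s = q + 1 := by
      have h1 : b - j + s - 1 = (r - 1) + (q + 1) * s := by omega
      rw [h1, Int.add_mul_ediv_right _ _ (ne_of_gt hs), Int.ediv_eq_zero_of_lt (by omega) (by omega), zero_add]
    rw [if_pos hjb, hc1, hc2]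
    simp

-- mod characterization: i % k = j for 0 ≤ j < k means k ∣ i - j
theorem mod_eq_iff_dvd {i k j : Int} (hj0 : 0 ≤ j) (hjk : j < k) :
    PySem.Int.mod i k = j ↔ k ∣ (i - j) := by
  have hk : 0 < k := lt_of_le_of_lt hj0 hjk
  rw [PySem.Int.mod_eq_emod_of_pos hk]
  constructor
  · intro h
    have := Int.mul_ediv_add_emod i k
    exact ⟨i / k, by omega⟩
  · rintro ⟨q, hq⟩
    have h1 : i = k * q + j := by omega
    rw [h1, Int.mul_add_emod_self_left]
    exact Int.emod_eq_of_lt hj0 hjk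

theorem pyGetD_replicate_nil (kk : Nat) (j : Int) (hj : 0 ≤ j) :
    PySem.List.pyGetD (List.replicate kk ([] : List Int)) j [] = [] := by
  rw [PySem.List.pyGetD_of_nonneg _ _ hj]
  simp [List.getD]

-- THE BUCKET LEMMA: after A's distributing loop over range(0, n), bucket j holds
-- exactly the elements a[i] for i in range(j, n, k), for every 0 ≤ j < k
theorem bucket_lemma (a : List Int) (k : Int) (n : Int) (hn : 0 ≤ n) :
    ∀ j : Int, 0 ≤ j → j < k →
    PySem.List.pyGetD
      ((PySem.List.pyRange 0 n 1).foldl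
        (fun S i => appendAt S (PySem.Int.mod i k) (PySem.List.pyGetD a i 0))
        (List.replicate k.toNat []))
      j []
      = (PySem.List.pyRange j n k).map (fun i => PySem.List.pyGetD a i 0) := by
  induction n, hn using Int.le_induction with
  | base =>
    intro j hj0 hjk
    have hk : 0 < k := lt_of_le_of_lt hj0 hjk
    rw [PySem.List.pyRange_one_eq_nil le_rfl, pyRange_pos_eq_nil hk hj0]
    simpa using pyGetD_replicate_nil k.toNat j hj0
  | succ n hn0 ih =>
    intro j hj0 hjk
    have hk : 0 < k := lt_of_le_of_lt hj0 hjk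
    rw [PySem.List.pyRange_one_succ_right (by omega : (0:Int) ≤ n), List.foldl_append]
    simp only [List.foldl_cons, List.foldl_nil]
    set S := (PySem.List.pyRange 0 n 1).foldl
        (fun S i => appendAt S (PySem.Int.mod i k) (PySem.List.pyGetD a i 0))
        (List.replicate k.toNat []) with hS
    have hlen : (S.length : Int) = k := by
      rw [hS, foldl_appendAt_length _ _ (fun i => PySem.Int.mod i k) (fun i => PySem.List.pyGetD a i 0)]
      simp
      omega
    rw [appendAt_pyGetD S _ _ j hj0 (by omega)]
    by_cases hj : j = PySem.Int.mod n k
    · have hdvd : k ∣ (n - j) := (mod_eq_iff_dvd hj0 hjk).mp hj.symm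
      have hjn : j ≤ n := by
        have hq0 : 0 ≤ n / k := Int.ediv_nonneg (by omega) (le_of_lt hk)
        have := Int.mul_ediv_add_emod n k
        have hmod : PySem.Int.mod n k = n % k := PySem.Int.mod_eq_emod_of_pos hk
        nlinarith [hj, hmod]
      rw [if_pos hj, ih j hj0 hjk, pyRange_pos_succ_right hk hjn, if_pos hdvd,
        List.map_append]
      simp
    · rw [if_neg hj, ih j hj0 hjk]
      by_cases hjn : j ≤ n
      · have hndvd : ¬ k ∣ (n - j) := fun hdvd => hj ((mod_eq_iff_dvd hj0 hjk).mpr hdvd).symm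
        rw [pyRange_pos_succ_right hk hjn, if_neg hndvd, List.append_nil]
      · rw [pyRange_pos_eq_nil hk (by omega), pyRange_pos_eq_nil hk (by omega)]

-- ===== VERDICT (by name: the statement is the Claim_ definition above) =====
theorem min_cost_of_array_spec : Claim_equal_min_cost_of_array := by
  intro n k a _ _
  show min_cost_of_array n k a = min_cost_of_array_alt n k a
  simp only [min_cost_of_array, min_cost_of_array_alt]
  rw [bOuter_g, findNZ_append_zero, PySem.List.foldl_append_eq_flatMap, List.nil_append]
  set S := (PySem.List.pyRange 0 n 1).foldl
      (fun S i => appendAt S (PySem.Int.mod i k) (PySem.List.pyGetD a i 0))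
      (List.replicate k.toNat []) with hS
  set B := (PySem.List.pyRange 1 k 2).flatMap (fun j => PySem.List.pyGetD S j []) with hB
  have hlen : (((B ++ [(0:Int)]).length : Nat) : Int) = 0 + (B.length : Int) + 1 := by
    simp
  rw [hlen, findNZ_g B 0]
  have hbuckets : B = (PySem.List.pyRange 1 k 2).flatMap
      (fun j => (PySem.List.pyRange j n k).map (fun i => PySem.List.pyGetD a i 0)) := by
    rw [hB]
    apply List.flatMap_congr
    intro j hj
    obtain ⟨h1, h2, -⟩ := (PySem.List.mem_pyRange_iff_of_pos (by norm_num) j).mp hj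
    have hj0 : (0:Int) ≤ j := by omega
    by_cases hn : (0:Int) ≤ n
    · exact bucket_lemma a k n hn j hj0 h2
    · rw [hS, PySem.List.pyRange_one_eq_nil (by omega : n ≤ (0:Int))]
      simp only [List.foldl_nil]
      rw [pyRange_pos_eq_nil (lt_of_le_of_lt hj0 h2) (by omega : n ≤ j)]
      simpa using pyGetD_replicate_nil k.toNat j hj0
  rw [hbuckets]
  norm_num
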